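-- pv_equiv track=rewrite | github.com/toomzheng/dsc20 | homework/hw03.py | new_orders
-- ===== SOURCE A (Python) =====
-- def new_orders(orders, action, dish_name, amount):
--     """
--     Updates lunch orders based on given action of either 'add' or 'remove'
--
--     Args:
--         orders (dict): a dict where keys are food items (strings) and values
--         are quantities (ints)
--         action (str): the operation to be performed
--         dish_name (str): the food to update
--         amount (int): the number of the food item to update (non negative)
--
--     Returns:
--         dict: A dictionary with updated amounts of food items
--     >>> orders = {'pizza': 10, 'burger': 5}
--     >>> new_orders(orders, 'add', 'pizza', 5)
--     {'pizza': 15, 'burger': 5}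
--
--     >>> new_orders(orders, 'remove', 'burger', 3)
--     {'pizza': 10, 'burger': 2}
--
--     >>> new_orders(orders, 'remove', 'pizza', 15)
--     {'pizza': 0, 'burger': 5}
--
--     >>> new_orders([], 'remove', 'burger', 3)
--     Traceback (most recent call last):
--     ...
--     AssertionError
--
--     >>> orders = {'pizza': 0, 'burger': 5}
--     >>> new_orders(orders, 'add', 'pizza', 10)
--     {'pizza': 10, 'burger': 5}
--
--     >>> orders = {'pizza': 10, 'burger': 5}
--     >>> new_orders(orders, 'add', 'salad', 3)
--     Traceback (most recent call last):
--     ...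
--     AssertionError
--
--     >>> orders = {'pizza': 10, 'burger': 5}
--     >>> new_orders(orders, 'remove', 'pizza', 0)
--     {'pizza': 10, 'burger': 5}
--     """
--     # check that orders is a dictionary
--     assert isinstance(orders, dict)
--     # check that the order contains food keys and int values
--     assert all([isinstance(key, str) and isinstance(value, int) \
--         and value >= 0 for key, value in orders.items()])
--     # check that ths action is appropriate
--     assert action in ["add", "remove"]
--     # check the dish name is string
--     assert isinstance(dish_name, str)
--     # check that amount is non negative
--     assert isinstance(amount, int) and amount >= 0
--     # ensure that the dish name already exists in orders
--     assert dish_name in orders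
--     # return a dictionary
--     return {
--         # add amount of the action is to add
--         key: (value + amount if key == dish_name and action == 'add' else\
--             # otherwise remove the amount and ensure it stays 0 minimum
--             max(0, value - amount) if key == dish_name and action == 'remove'\
--             # otherwise if the dish name is not the key, don't change the value
--             else value) for key in orders for value in [orders[key]]}
-- ===== SOURCE B (Python) =====
-- def new_orders(orders, action, dish_name, amount):
--     # same validation as the original
--     assert isinstance(orders, dict)
--     assert all([isinstance(key, str) and isinstance(value, int)
--                 and value >= 0 for key, value in orders.items()])
--     assert action in ["add", "remove"]
--     assert isinstance(dish_name, str)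
--     assert isinstance(amount, int) and amount >= 0
--     assert dish_name in orders
--     # signed delta unifies the two actions into one clamped update:
--     # max(0, v + amount) == v + amount since v, amount >= 0, so one formula serves both.
--     delta = amount if action == 'add' else -amount
--
--     # recursive find-and-splice: walk the items until the dish is found,
--     # patch that single entry and keep the untouched tail as-is (early stop).
--     def splice(items):
--         if not items:
--             return []
--         key, value = items[0]
--         if key == dish_name:
--             return [(key, max(0, value + delta))] + items[1:]
--         return [items[0]] + splice(items[1:])
--
--     return dict(splice(list(orders.items())))
-- ===== Notes on version B (the rewrite author's own statement) =====
-- stated objective: alternative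
-- what changed: A rebuilds every entry with a comprehension applying a three-way add/remove/keep branch per key; B folds the two actions into one signed delta with a single clamped formula max(0, v+delta) and patches only the matching entry by a recursive find-and-splice that stops at the first match, keeping the tail untouched.
import Mathlib
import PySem

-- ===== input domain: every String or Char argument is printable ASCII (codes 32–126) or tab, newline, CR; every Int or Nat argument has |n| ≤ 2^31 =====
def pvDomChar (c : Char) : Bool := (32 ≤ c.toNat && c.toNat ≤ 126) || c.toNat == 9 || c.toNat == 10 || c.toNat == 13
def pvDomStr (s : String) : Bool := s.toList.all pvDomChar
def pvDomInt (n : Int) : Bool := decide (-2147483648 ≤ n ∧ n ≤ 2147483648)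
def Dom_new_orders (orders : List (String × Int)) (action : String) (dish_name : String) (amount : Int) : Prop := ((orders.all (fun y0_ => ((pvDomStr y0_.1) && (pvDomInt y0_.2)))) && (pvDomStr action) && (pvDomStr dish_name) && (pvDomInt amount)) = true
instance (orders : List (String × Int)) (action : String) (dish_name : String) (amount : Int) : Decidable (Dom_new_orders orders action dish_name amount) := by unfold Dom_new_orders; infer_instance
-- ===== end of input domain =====

-- B replaces A's rebuild-every-key comprehension by a signed-delta, single clamped formula and a
-- recursive find-and-splice that patches one entry and stops at the first match (objective: alternative).


-- ===== PORT A =====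
-- Comprehension over the dict's keys, rebuilding every entry through a three-way branch.
-- orders[key] is ported as getD with default 0: key is drawn from the dict's own keys, so the lookup never misses.
def new_orders (orders : List (String × Int)) (action : String) (dish_name : String) (amount : Int) : List (String × Int) :=
  let d := PySem.Dict.mk orders
  (PySem.Dict.keys d).map (fun key =>
    let value := PySem.Dict.getD d key 0
    (key, if key == dish_name && action == "add" then value + amount
          else if key == dish_name && action == "remove" then max 0 (value - amount)
          else value))

-- ===== PORT B =====
-- Recursive find-and-splice over the item list: patch the first entry whose key is the dish
-- (one clamped formula with a signed delta) and return the untouched tail as-is.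
def nsplice (dish_name : String) (delta : Int) : List (String × Int) → List (String × Int)
  | [] => []
  | (key, value) :: rest =>
    if key == dish_name then (key, max 0 (value + delta)) :: rest
    else (key, value) :: nsplice dish_name delta rest

-- final dict(...) is PySem.Dict.mk: the spliced items keep orders' unique keys, so dict() rewraps them unchanged.
def new_orders_alt (orders : List (String × Int)) (action : String) (dish_name : String) (amount : Int) : List (String × Int) :=
  let delta := if action == "add" then amount else -amount
  (PySem.Dict.mk (nsplice dish_name delta (PySem.Dict.mk orders).items)).items

-- ===== PRECONDITION & SPEC =====
-- A's asserts raise AssertionError unless: all values ≥ 0, action ∈ {"add","remove"}, amount ≥ 0, dish_name a key.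
-- Nodup keys is representation-level only: a Python dict cannot hold duplicate keys, so no excluded input reaches A.
def Pre_new_orders (orders : List (String × Int)) (action : String) (dish_name : String) (amount : Int) : Prop :=
  (orders.map Prod.fst).Nodup ∧ (∀ p ∈ orders, 0 ≤ p.2) ∧
  (action = "add" ∨ action = "remove") ∧ 0 ≤ amount ∧ dish_name ∈ orders.map Prod.fst
instance (orders : List (String × Int)) (action : String) (dish_name : String) (amount : Int) : Decidable (Pre_new_orders orders action dish_name amount) := by unfold Pre_new_orders; infer_instance
def pvWitness_new_orders : (List (String × Int)) × String × String × Int := ([("pizza", 10), ("burger", 5)], "add", "pizza", 5)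
def Spec_new_orders (orders : List (String × Int)) (action : String) (dish_name : String) (amount : Int) (out : List (String × Int)) : Prop := out = new_orders_alt orders action dish_name amount
instance (orders : List (String × Int)) (action : String) (dish_name : String) (amount : Int) (out : List (String × Int)) : Decidable (Spec_new_orders orders action dish_name amount out) := by unfold Spec_new_orders; infer_instance

-- ===== CLAIM (what is proved, stated in full; the proofs are below) =====
def Claim_equal_new_orders : Prop := ∀ (orders : List (String × Int)) (action : String) (dish_name : String) (amount : Int), Dom_new_orders orders action dish_name amount → Pre_new_orders orders action dish_name amount → Spec_new_orders orders action dish_name amount (new_orders orders action dish_name amount)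

-- ===== LEMMAS AND PROOFS =====

-- the per-key map of A equals the find-and-splice of B, given nodup keys, dish present,
-- nonneg values/amount and a legal action
theorem map_eq_nsplice (dish action : String) (amount : Int)
    (hact : action = "add" ∨ action = "remove") (ham : 0 ≤ amount)
    (l : List (String × Int)) (hnd : (l.map Prod.fst).Nodup) (hv : ∀ p ∈ l, 0 ≤ p.2) :
    l.map (fun p =>
      (p.1, if p.1 == dish && action == "add" then p.2 + amount
            else if p.1 == dish && action == "remove" then max 0 (p.2 - amount)
            else p.2))
    = nsplice dish (if action == "add" then amount else -amount) l := by
  induction l with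
  | nil => rfl
  | cons p rest ih =>
    obtain ⟨k, v⟩ := p
    have hnd' : k ∉ rest.map Prod.fst ∧ (rest.map Prod.fst).Nodup := by
      rw [← List.nodup_cons]; simpa using hnd
    have hndr : (rest.map Prod.fst).Nodup := hnd'.2
    have hvr : ∀ p ∈ rest, 0 ≤ p.2 := fun p hp => hv p (List.mem_cons_of_mem _ hp)
    by_cases hk : k = dish
    · subst hk
      have hv0 : 0 ≤ v := hv (k, v) List.mem_cons_self
      have hnotin : ∀ p ∈ rest, (p.1 == k) = false := by
        intro p hp
        have h1 : p.1 ∈ rest.map Prod.fst := List.mem_map_of_mem hp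
        have h2 := hnd'.1
        simp only [beq_eq_false_iff_ne, ne_eq]
        intro he; exact h2 (he ▸ h1)
      have htail : rest.map (fun p =>
          (p.1, if p.1 == k && action == "add" then p.2 + amount
                else if p.1 == k && action == "remove" then max 0 (p.2 - amount)
                else p.2)) = rest := by
        refine (List.map_congr_left ?_).trans (List.map_id rest)
        intro p hp
        simp [hnotin p hp]
      rcases hact with h | h <;> subst h <;> rw [List.map_cons, htail]
      · have hd : (if ("add" : String) == "add" then amount else -amount) = amount := by simp
        rw [hd]
        have hstep : nsplice k amount ((k, v) :: rest) = (k, max 0 (v + amount)) :: rest := by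
          simp [nsplice]
        rw [hstep]
        have hm : max 0 (v + amount) = v + amount := by omega
        simp [hm]
      · have hd : (if ("remove" : String) == "add" then amount else -amount) = -amount := by simp
        rw [hd]
        have hstep : nsplice k (-amount) ((k, v) :: rest) = (k, max 0 (v + -amount)) :: rest := by
          simp [nsplice]
        rw [hstep]
        have hm : max 0 (v - amount) = max 0 (v + -amount) := by omega
        simp [hm]
    · have hne : (k == dish) = false := by simpa using hk
      have hstep : nsplice dish (if action == "add" then amount else -amount) ((k, v) :: rest)
          = (k, v) :: nsplice dish (if action == "add" then amount else -amount) rest := by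
        simp [nsplice, hne]
      rw [List.map_cons, hstep, ← ih hndr hvr]
      congr 1
      simp [hne]

-- Dict.mk is the literal items wrapper, so its items are the list itself
theorem items_mk_self (l : List (String × Int)) : (PySem.Dict.mk l).items = l := rfl

-- ===== VERDICT (by name: the statement is the Claim_ definition above) =====
theorem new_orders_spec : Claim_equal_new_orders := by
  intro orders action dish_name amount _hdom hpre
  obtain ⟨hnd, hvals, hact, ham, _hmem⟩ := hpre
  show new_orders orders action dish_name amount = new_orders_alt orders action dish_name amount
  have hkeys : (PySem.Dict.mk orders).keys.Nodup := by
    simpa [PySem.Dict.keys, items_mk_self] using hnd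
  unfold new_orders new_orders_alt
  simp only [PySem.Dict.keys, List.map_map]
  have hA : orders.map
      ((fun key =>
        (key, if key == dish_name && action == "add" then PySem.Dict.getD (PySem.Dict.mk orders) key 0 + amount
              else if key == dish_name && action == "remove" then max 0 (PySem.Dict.getD (PySem.Dict.mk orders) key 0 - amount)
              else PySem.Dict.getD (PySem.Dict.mk orders) key 0)) ∘ Prod.fst)
      = orders.map (fun p =>
        (p.1, if p.1 == dish_name && action == "add" then p.2 + amount
              else if p.1 == dish_name && action == "remove" then max 0 (p.2 - amount)
              else p.2)) := by
    apply List.map_congr_left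
    intro p hp
    obtain ⟨k, v⟩ := p
    have hg : PySem.Dict.getD (PySem.Dict.mk orders) k 0 = v :=
      PySem.Dict.getD_of_mem_items _ (by rw [items_mk_self]; exact hp) hkeys 0
    simp [Function.comp, hg]
  rw [hA, map_eq_nsplice dish_name action amount hact ham orders hnd hvals]
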